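-- pv_equiv track=rewrite | github.com/kanedeiley/advent_of_code | 2025/03/p2.py | get_max_id
-- ===== SOURCE A (Python) =====
-- def get_max_id(battery):
--     max_id = ""
--     start_index = 0
--
--     for digit_position in range(12):
--         remaining_digits = 12 - digit_position
--
--         search_end = len(battery) - remaining_digits + 1
--
--         max_digit = max(battery[start_index:search_end])
--
--         max_index = battery.find(max_digit, start_index, search_end)
--
--         max_id += max_digit
--         start_index = max_index + 1
--
--
--     return max_id
-- ===== SOURCE B (Python) =====
-- def get_max_id(battery):
--     # Sort-then-scan: pre-sort all (index, char) pairs once by (char descending,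
--     # index ascending); each of the 12 rounds picks the first pair whose index
--     # lies in the still-feasible window, which is exactly the leftmost maximal
--     # character of that window.
--     order = sorted(enumerate(battery), key=lambda t: (-ord(t[1]), t[0]))
--     out = []
--     start = 0
--     for remaining in range(12, 0, -1):
--         end = len(battery) - remaining + 1
--         i, c = next(t for t in order if start <= t[0] < end)
--         out.append(c)
--         start = i + 1
--     return "".join(out)
-- ===== Notes on version B (the rewrite author's own statement) =====
-- stated objective: alternative
-- what changed: Replaces A's twelve slice/max/find passes over the string with one pre-sort of all (index, char) pairs by (char descending, index ascending); each of the 12 rounds then just takes the first pair whose index lies in the still-feasible window, which is exactly the leftmost maximal character of that window.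
import Mathlib
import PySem

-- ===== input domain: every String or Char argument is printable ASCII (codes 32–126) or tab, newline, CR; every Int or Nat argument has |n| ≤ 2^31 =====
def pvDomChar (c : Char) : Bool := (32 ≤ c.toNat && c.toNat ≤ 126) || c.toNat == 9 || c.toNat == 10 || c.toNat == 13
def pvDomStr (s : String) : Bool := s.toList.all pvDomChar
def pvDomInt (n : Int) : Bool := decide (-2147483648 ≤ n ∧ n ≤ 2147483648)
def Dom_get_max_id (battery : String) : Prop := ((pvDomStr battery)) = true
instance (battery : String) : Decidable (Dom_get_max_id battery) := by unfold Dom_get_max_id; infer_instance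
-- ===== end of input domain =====

-- B replaces A's twelve max/find scans by one pre-sort of (index, char) pairs; same return value on
-- every string of length ≥ 12 (objective: alternative algorithm, not claimed faster).

-- ===== PORT A =====
def get_max_id (battery : String) : String :=
  String.ofList ((PySem.List.pyRange 0 12 1).foldl (fun (st : List Char × Int) digit_position =>
      let remaining_digits : Int := 12 - digit_position
      let search_end : Int := (battery.toList.length : Int) - remaining_digits + 1
      match PySem.List.max? (PySem.List.slice battery.toList (some st.2) (some search_end)) (fun c => c) with
      | none => st   -- Python: max() on the empty slice raises ValueError (excluded by Pre_)
      | some max_digit =>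
          (st.1 ++ [max_digit],
           PySem.Chars.findFrom battery.toList [max_digit] st.2 (some search_end) + 1)
    ) ([], 0)).1

-- ===== PORT B =====
def get_max_id_alt (battery : String) : String :=
  let cs := battery.toList
  let order := PySem.List.sorted2 (PySem.List.enumerate cs) (fun t => -(t.2.toNat : Int)) (fun t => t.1)
  String.ofList ((PySem.List.pyRange 12 0 (-1)).foldl (fun (st : List Char × Int) remaining =>
      let e : Int := (cs.length : Int) - remaining + 1
      match order.find? (fun t => decide (st.2 ≤ t.1 ∧ t.1 < e)) with
      | none => st   -- Python: next() raises StopIteration (excluded by Pre_)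
      | some t => (st.1 ++ [t.2], t.1 + 1)
    ) ([], 0)).1

-- ===== PRECONDITION & SPEC =====
-- Pre_ excludes strings shorter than 12, on which A's max() over an empty slice raises ValueError.
def Pre_get_max_id (battery : String) : Prop := 12 ≤ battery.toList.length
instance (battery : String) : Decidable (Pre_get_max_id battery) := by unfold Pre_get_max_id; infer_instance
def pvWitness_get_max_id : String := "314159265358"

def Spec_get_max_id (battery : String) (out : String) : Prop := out = get_max_id_alt battery
instance (battery : String) (out : String) : Decidable (Spec_get_max_id battery out) := by unfold Spec_get_max_id; infer_instance

-- ===== CLAIM (what is proved, stated in full; the proofs are below) =====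
def Claim_equal_get_max_id : Prop := ∀ (battery : String), Dom_get_max_id battery → Pre_get_max_id battery → Spec_get_max_id battery (get_max_id battery)

-- ===== LEMMAS AND PROOFS =====

-- key under which B's pre-sort orders the (index, char) pairs: (char descending, index ascending)
def pvKey (t : Int × Char) : Lex (Int × Int) := toLex (-(t.2.toNat : Int), t.1)

def pvOrder (cs : List Char) : List (Int × Char) :=
  PySem.List.sorted2 (PySem.List.enumerate cs) (fun t => -(t.2.toNat : Int)) (fun t => t.1)

-- one round of A's loop, parametrised by the remaining count
def pvStepA (cs : List Char) (st : List Char × Int) (rem : Int) : List Char × Int :=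
  let e : Int := (cs.length : Int) - rem + 1
  match PySem.List.max? (PySem.List.slice cs (some st.2) (some e)) (fun c => c) with
  | none => st
  | some m => (st.1 ++ [m], PySem.Chars.findFrom cs [m] st.2 (some e) + 1)

-- one round of B's loop
def pvStepB (cs : List Char) (order : List (Int × Char)) (st : List Char × Int) (rem : Int) : List Char × Int :=
  let e : Int := (cs.length : Int) - rem + 1
  match order.find? (fun t => decide (st.2 ≤ t.1 ∧ t.1 < e)) with
  | none => st
  | some t => (st.1 ++ [t.2], t.1 + 1)

def pvRevRange : Nat → List Int
  | 0 => []
  | r + 1 => ((r + 1 : Nat) : Int) :: pvRevRange r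

lemma pvA_eq (battery : String) :
    get_max_id battery = String.ofList ((pvRevRange 12).foldl (pvStepA battery.toList) ([], 0)).1 := by
  have h : pvRevRange 12 = (PySem.List.pyRange 0 12 1).map (fun dp => 12 - dp) := by decide
  rw [h, List.foldl_map]
  rfl

lemma pvB_eq (battery : String) :
    get_max_id_alt battery
      = String.ofList ((pvRevRange 12).foldl (pvStepB battery.toList (pvOrder battery.toList)) ([], 0)).1 := by
  have h : pvRevRange 12 = PySem.List.pyRange 12 0 (-1) := by decide
  rw [h]
  rfl

lemma pvOrder_eq (cs : List Char) :
    pvOrder cs = PySem.List.sorted (PySem.List.enumerate cs) pvKey := by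
  rw [PySem.List.sorted_eq_foldl_insertBy]
  show List.foldl (fun acc x => PySem.List.insertBy
        (fun a b : Int × Char => decide (-(a.2.toNat : Int) < -(b.2.toNat : Int)) ||
          (!decide (-(b.2.toNat : Int) < -(a.2.toNat : Int)) && decide (a.1 < b.1))) x acc)
      [] (PySem.List.enumerate cs)
    = List.foldl (fun acc x => PySem.List.insertBy (fun a b => decide (pvKey a < pvKey b)) x acc)
      [] (PySem.List.enumerate cs)
  refine congrArg (fun f : (Int × Char) → (Int × Char) → Bool =>
    List.foldl (fun acc x => PySem.List.insertBy f x acc) [] (PySem.List.enumerate cs)) ?_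
  funext a b
  rw [Bool.eq_iff_iff]
  simp [pvKey, Prod.Lex.toLex_lt_toLex]
  omega

lemma pv_find?_sorted {l : List (Int × Char)} {p : Int × Char → Bool} {a : Int × Char}
    (hpair : l.Pairwise (fun x y => pvKey x ≤ pvKey y)) (ha : a ∈ l) (hpa : p a = true)
    (hmin : ∀ t ∈ l, p t = true → pvKey a ≤ pvKey t)
    (hinj : ∀ t ∈ l, p t = true → pvKey t = pvKey a → t = a) :
    l.find? p = some a := by
  induction l with
  | nil => cases ha
  | cons x rest ih =>
    rcases List.pairwise_cons.mp hpair with ⟨hx, hrest⟩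
    by_cases hpx : p x = true
    · rw [List.find?_cons_of_pos hpx]
      rcases List.mem_cons.mp ha with h | ha'
      · rw [h]
      · have h1 : pvKey a ≤ pvKey x := hmin x (List.mem_cons_self) hpx
        have h2 : pvKey x ≤ pvKey a := hx a ha'
        rw [hinj x (List.mem_cons_self) hpx (le_antisymm h2 h1)]
    · rw [List.find?_cons_of_neg (by simpa using hpx)]
      have ha' : a ∈ rest := by
        rcases List.mem_cons.mp ha with h | h
        · exact absurd (h ▸ hpa) hpx
        · exact h
      exact ih hrest ha' (fun t ht hp => hmin t (List.mem_cons_of_mem _ ht) hp)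
        (fun t ht hp he => hinj t (List.mem_cons_of_mem _ ht) hp he)

lemma pvRound (cs : List Char) (rem : Int) (out : List Char) (s : Int)
    (h1 : 1 ≤ rem) (hs0 : 0 ≤ s) (hb : s + rem ≤ (cs.length : Int)) :
    ∃ (i : Int) (c : Char),
      pvStepA cs (out, s) rem = (out ++ [c], i + 1) ∧
      pvStepB cs (pvOrder cs) (out, s) rem = (out ++ [c], i + 1) ∧
      s ≤ i ∧ i + rem ≤ (cs.length : Int) := by
  set e : Int := (cs.length : Int) - rem + 1 with he_def
  have he0 : 0 ≤ e := by omega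
  set w := PySem.List.slice cs (some s) (some e) with hw_def
  have hw : w = List.take (e.toNat - s.toNat) (List.drop s.toNat cs) :=
    PySem.List.slice_toNat cs hs0 he0
  have hsn : s.toNat < e.toNat := by omega
  have hen : e.toNat ≤ cs.length := by omega
  have hwlen : w.length = e.toNat - s.toNat := by
    rw [hw]; simp; omega
  have hwne : w ≠ [] := by
    intro h; rw [h] at hwlen; simp at hwlen; omega
  cases hmx : PySem.List.max? w (fun c => c) with
  | none => exact absurd ((PySem.List.max?_eq_none_iff w _).mp hmx) hwne
  | some m =>
  have hm_mem : m ∈ w := PySem.List.max?_mem hmx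
  have hm_max : ∀ y ∈ w, y ≤ m := PySem.List.max?_isMax hmx
  have hinfix : [m] <:+: w := (List.singleton_infix_iff m w).mpr hm_mem
  set r := PySem.Chars.find w [m] with hr_def
  have hdt : List.drop s.toNat (List.take e.toNat cs) = w := by
    rw [hw, List.drop_take]
  have hrne : r ≠ -1 := fun h => ((PySem.Chars.find_eq_neg_one_iff w [m]).mp h) hinfix
  have hr0 : 0 ≤ r := by have := PySem.Chars.neg_one_le_find w [m]; omega
  obtain ⟨hpre, hminf⟩ := PySem.Chars.find_spec (s := w) (sub := [m]) hr0
  obtain ⟨t, ht⟩ := hpre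
  have hrlen : r.toNat < w.length := by
    have := congrArg List.length ht; simp at this; omega
  have hwr : w[r.toNat]'hrlen = m := by
    have hd := List.drop_eq_getElem_cons hrlen
    rw [hd, List.singleton_append] at ht
    injection ht with h1 h2
    exact h1.symm
  have hwg : ∀ (j : Nat) (hj : j < w.length),
      w[j]'hj = cs[s.toNat + j]'(by rw [hwlen] at hj; omega) := by
    intro j hj
    simp only [hw, List.getElem_take, List.getElem_drop]
  have hm_cs : cs[s.toNat + r.toNat]'(by rw [hwlen] at hrlen; omega) = m := by
    rw [← hwg r.toNat hrlen, hwr]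
  have hfindFrom : PySem.Chars.findFrom cs [m] s (some e) = s + r := by
    simp only [PySem.Chars.findFrom]
    simp only [show ¬((cs.length : Int) < e) by omega, if_false,
      show ¬(e < 0) by omega, show ¬(s < 0) by omega]
    rw [if_neg (show ¬(e < s) by omega), hdt, if_neg hrne]
  have hstepA : pvStepA cs (out, s) rem = (out ++ [m], (s + r) + 1) := by
    simp only [pvStepA]
    rw [← he_def, ← hw_def, hmx]
    show (out ++ [m], PySem.Chars.findFrom cs [m] s (some e) + 1) = (out ++ [m], (s + r) + 1)
    rw [hfindFrom]
  have hperm : (pvOrder cs).Perm (PySem.List.enumerate cs) :=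
    PySem.List.sorted2_perm _ _ _ _
  have hpair : (pvOrder cs).Pairwise (fun x y => pvKey x ≤ pvKey y) := by
    rw [pvOrder_eq]; exact PySem.List.sorted_pairwise _ _
  have ha_enum : ((s + r, m) : Int × Char) ∈ PySem.List.enumerate cs := by
    rw [PySem.List.mem_enumerate_iff]
    refine ⟨s.toNat + r.toNat, by rw [hwlen] at hrlen; omega, ?_⟩
    simp only [Prod.mk.injEq]
    exact ⟨by push_cast; omega, hm_cs.symm⟩
  have hfound : (pvOrder cs).find? (fun t => decide (s ≤ t.1 ∧ t.1 < e)) = some (s + r, m) := by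
    apply pv_find?_sorted hpair (hperm.mem_iff.mpr ha_enum)
    · simp only [decide_eq_true_eq]
      exact ⟨by omega, by rw [hwlen] at hrlen; omega⟩
    · intro u humem hpu
      obtain ⟨k, hkk, rfl⟩ := (PySem.List.mem_enumerate_iff cs 0 u).mp (hperm.mem_iff.mp humem)
      simp only [decide_eq_true_eq] at hpu
      have hks : s.toNat ≤ k := by omega
      have hke : k < e.toNat := by omega
      have hjw : k - s.toNat < w.length := by omega
      have hwk : w[k - s.toNat]'hjw = cs[k]'hkk := by
        rw [hwg (k - s.toNat) hjw]
        congr 1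
        omega
      have hkw : cs[k]'hkk ∈ w := hwk ▸ List.getElem_mem hjw
      have hle : cs[k]'hkk ≤ m := hm_max _ hkw
      rcases lt_or_eq_of_le hle with hlt | heq
      · apply le_of_lt
        rw [pvKey, pvKey, Prod.Lex.toLex_lt_toLex]
        left
        dsimp only
        have h' : (cs[k]'hkk).toNat < m.toNat := hlt
        omega
      · rw [pvKey, pvKey, Prod.Lex.toLex_le_toLex]
        right
        dsimp only
        refine ⟨by rw [heq], ?_⟩
        by_contra hlt
        have hj : k - s.toNat < r.toNat := by omega
        apply hminf (k - s.toNat) (by rw [← hr_def]; exact hj)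
        rw [List.drop_eq_getElem_cons hjw, hwk, heq]
        exact ⟨_, rfl⟩
    · intro u humem hpu hkey
      obtain ⟨k, hkk, rfl⟩ := (PySem.List.mem_enumerate_iff cs 0 u).mp (hperm.mem_iff.mp humem)
      have h2 : ((0 : Int) + k, -(((0 + (k:Int), cs[k]'hkk).2.toNat : Int))) = (s + r, -((m.toNat : Int))) := by
        have := toLex.injective (hkey : pvKey _ = pvKey _)
        dsimp only [pvKey] at this
        injection this with ha hb'
        exact Prod.ext_iff.mpr ⟨hb', ha⟩
      have hik : (0 : Int) + k = s + r := (Prod.ext_iff.mp h2).1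
      have hkn : k = s.toNat + r.toNat := by omega
      simp only [Prod.mk.injEq]
      refine ⟨by omega, ?_⟩
      rw [show cs[k]'hkk = cs[s.toNat + r.toNat]'(by omega) from by congr 1, hm_cs]
  have hstepB : pvStepB cs (pvOrder cs) (out, s) rem = (out ++ [m], (s + r) + 1) := by
    simp only [pvStepB]
    rw [← he_def, hfound]
  exact ⟨s + r, m, hstepA, hstepB, by omega, by rw [hwlen] at hrlen; omega⟩

lemma pvMain (cs : List Char) (r : Nat) : ∀ (out : List Char) (s : Int), 0 ≤ s →
    s + (r : Int) ≤ (cs.length : Int) →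
    (pvRevRange r).foldl (pvStepA cs) (out, s) = (pvRevRange r).foldl (pvStepB cs (pvOrder cs)) (out, s) := by
  induction r with
  | zero => intro out s _ _; rfl
  | succ r ih =>
    intro out s hs0 hb
    obtain ⟨i, c, hA, hB, hsi, hib⟩ := pvRound cs ((r : Int) + 1) out s (by omega) hs0 (by push_cast at hb ⊢; omega)
    have hc : ((r + 1 : Nat) : Int) = (r : Int) + 1 := by push_cast; ring
    simp only [pvRevRange, List.foldl_cons, hc, hA, hB]
    exact ih (out ++ [c]) (i + 1) (by omega) (by omega)

-- ===== VERDICT (by name: the statement is the Claim_ definition above) =====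
theorem get_max_id_spec : Claim_equal_get_max_id := by
  intro battery _ hpre
  unfold Spec_get_max_id
  rw [pvA_eq, pvB_eq]
  have h := pvMain battery.toList 12 [] 0 (by norm_num)
    (by unfold Pre_get_max_id at hpre; push_cast; omega)
  rw [h]
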